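-- pv_equiv track=rewrite | github.com/sbz/coding-prep | binary-parts.py | count_ones_per_partition
-- ===== SOURCE A (Python) =====
-- def count_ones_per_partition(array, one_per_part, start=0):
--     i = start
--     count_ones = 0
--     while i < len(array) - 1 and count_ones != one_per_part:
--         if array[i] == 1:
--             count_ones += 1
--         i += 1
--     return i
-- ===== SOURCE B (Python) =====
-- def count_ones_per_partition(array, one_per_part, start=0):
--     n = len(array)
--     if one_per_part == 0 or start >= n - 1:
--         return start
--     ones = [idx for idx in range(start, n - 1) if array[idx] == 1]
--     if one_per_part >= 1 and len(ones) >= one_per_part: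
--         return ones[one_per_part - 1] + 1
--     return n - 1
-- ===== Notes on version B (the rewrite author's own statement) =====
-- stated objective: alternative
-- what changed: Replaces A's early-stopping counter while-loop by a collect-then-select decomposition: gather the indices of 1s in the scan range with a comprehension, then return the target-th position + 1, with direct formulas for the immediate-exit and exhausted-scan cases.
import Mathlib
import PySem

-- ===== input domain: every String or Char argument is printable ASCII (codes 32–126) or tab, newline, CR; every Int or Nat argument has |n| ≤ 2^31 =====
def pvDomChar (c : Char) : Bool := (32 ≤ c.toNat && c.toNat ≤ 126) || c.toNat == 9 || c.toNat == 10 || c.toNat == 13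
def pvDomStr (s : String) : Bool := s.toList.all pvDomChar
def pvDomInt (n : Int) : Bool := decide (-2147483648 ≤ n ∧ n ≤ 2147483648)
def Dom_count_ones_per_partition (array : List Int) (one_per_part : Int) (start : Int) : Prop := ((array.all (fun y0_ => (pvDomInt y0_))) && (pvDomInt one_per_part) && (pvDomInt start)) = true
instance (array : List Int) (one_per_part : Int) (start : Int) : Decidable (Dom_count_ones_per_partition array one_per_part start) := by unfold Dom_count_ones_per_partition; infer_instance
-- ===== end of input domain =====

-- B replaces A's early-stopping counter loop by collect-the-one-positions-then-select (alternative decomposition, same cost).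

-- ===== PORT A =====
-- the while loop of A; `none` from pyGet? is Python's IndexError (excluded by Pre_), the returned i there is arbitrary
def pvLoopA (array : List Int) (one_per_part : Int) (i : Int) (count : Int) : Int :=
  if h : i < (array.length : Int) - 1 ∧ count ≠ one_per_part then
    match PySem.List.pyGet? array i with
    | some v => pvLoopA array one_per_part (i + 1) (if v = 1 then count + 1 else count)
    | none => i
  else i
termination_by ((array.length : Int) - 1 - i).toNat
decreasing_by omega

def count_ones_per_partition (array : List Int) (one_per_part : Int) (start : Int) : Int :=
  pvLoopA array one_per_part start 0

-- ===== PORT B =====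
-- the comprehension `[idx for idx in range(start, n-1) if array[idx] == 1]` (getD 0 is only reached where Python raises, outside Pre_)
def pvOnes (array : List Int) (start : Int) : List Int :=
  (PySem.List.pyRange start ((array.length : Int) - 1) 1).filter
    (fun idx => (PySem.List.pyGet? array idx).getD 0 = 1)

def count_ones_per_partition_alt (array : List Int) (one_per_part : Int) (start : Int) : Int :=
  if one_per_part = 0 ∨ (array.length : Int) - 1 ≤ start then start
  else
    let ones := pvOnes array start
    if 1 ≤ one_per_part ∧ one_per_part ≤ (ones.length : Int) then
      (PySem.List.pyGet? ones (one_per_part - 1)).getD 0 + 1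
    else (array.length : Int) - 1

-- ===== PRECONDITION & SPEC =====
-- Pre_ excludes exactly the inputs where A raises IndexError: a negative start below -len(array)
-- reached by the loop with a nonzero target (B's comprehension raises there too).
def Pre_count_ones_per_partition (array : List Int) (one_per_part : Int) (start : Int) : Prop :=
  one_per_part = 0 ∨ -(array.length : Int) ≤ start ∨ (array.length : Int) - 1 ≤ start
instance (array : List Int) (one_per_part : Int) (start : Int) : Decidable (Pre_count_ones_per_partition array one_per_part start) := by unfold Pre_count_ones_per_partition; infer_instance

def pvWitness_count_ones_per_partition : List Int × Int × Int := ([1, 0, 1, 0], 2, 0)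

def Spec_count_ones_per_partition (array : List Int) (one_per_part : Int) (start : Int) (out : Int) : Prop := out = count_ones_per_partition_alt array one_per_part start
instance (array : List Int) (one_per_part : Int) (start : Int) (out : Int) : Decidable (Spec_count_ones_per_partition array one_per_part start out) := by unfold Spec_count_ones_per_partition; infer_instance

-- ===== CLAIM (what is proved, stated in full; the proofs are below) =====
def Claim_equal_count_ones_per_partition : Prop := ∀ (array : List Int) (one_per_part : Int) (start : Int), Dom_count_ones_per_partition array one_per_part start → Pre_count_ones_per_partition array one_per_part start → Spec_count_ones_per_partition array one_per_part start (count_ones_per_partition array one_per_part start)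

-- ===== LEMMAS AND PROOFS =====

theorem pvWitness_ok : Dom_count_ones_per_partition pvWitness_count_ones_per_partition.1 pvWitness_count_ones_per_partition.2.1 pvWitness_count_ones_per_partition.2.2 ∧ Pre_count_ones_per_partition pvWitness_count_ones_per_partition.1 pvWitness_count_ones_per_partition.2.1 pvWitness_count_ones_per_partition.2.2 := by
  decide

theorem pyGet?_cons_pos (x : Int) (l : List Int) (m : Int) (h : 1 ≤ m) :
    PySem.List.pyGet? (x :: l) m = PySem.List.pyGet? l (m - 1) := by
  have hm : m = ((m - 1).toNat : Int) + 1 := by omega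
  rw [hm, PySem.List.pyGet?_cons_succ]
  congr 1
  omega

-- characterisation of A's loop from state (i, count), for -len ≤ i
theorem pvLoopA_eq (array : List Int) (p : Int) :
    ∀ (k : Nat) (i count : Int), (((array.length : Int) - 1 - i).toNat = k) →
      -(array.length : Int) ≤ i →
      pvLoopA array p i count =
        if ¬ (i < (array.length : Int) - 1) ∨ count = p then i
        else if 1 ≤ p - count ∧ p - count ≤ ((pvOnes array i).length : Int) then
          (PySem.List.pyGet? (pvOnes array i) (p - count - 1)).getD 0 + 1
        else (array.length : Int) - 1 := by
  intro k
  induction k with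
  | zero =>
    intro i count hk hi
    unfold pvLoopA
    rw [dif_neg (by omega), if_pos (Or.inl (by omega))]
  | succ k ih =>
    intro i count hk hi
    by_cases hc : i < (array.length : Int) - 1 ∧ count ≠ p
    · obtain ⟨h1, h2⟩ := hc
      obtain ⟨v, hv⟩ : ∃ v, PySem.List.pyGet? array i = some v := by
        cases hg : PySem.List.pyGet? array i with
        | none =>
          rw [PySem.List.pyGet?_eq_none_iff] at hg
          exact absurd ⟨hi, by omega⟩ hg
        | some v => exact ⟨v, rfl⟩
      by_cases hv1 : v = 1
      · -- array[i] == 1 : count increments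
        have hstep : pvLoopA array p i count = pvLoopA array p (i + 1) (count + 1) := by
          rw [pvLoopA, dif_pos ⟨h1, h2⟩, hv]
          simp [hv1]
        have hones : pvOnes array i = i :: pvOnes array (i + 1) := by
          unfold pvOnes
          rw [PySem.List.pyRange_one_cons h1, List.filter_cons]
          simp [hv, hv1]
        rw [hstep, ih (i + 1) (count + 1) (by omega) (by omega), hones,
            if_neg (show ¬(¬ i < (array.length : Int) - 1 ∨ count = p) from by
              push_neg; exact ⟨h1, h2⟩)]
        by_cases hdone : count + 1 = p
        · -- the target is reached exactly at index i: the loop stops at i+1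
          rw [if_pos (Or.inr hdone),
              if_pos (show 1 ≤ p - count ∧
                  p - count ≤ ((i :: pvOnes array (i + 1)).length : Int) from
                ⟨by omega, by simp only [List.length_cons]; push_cast; omega⟩),
              show p - count - 1 = 0 from by omega, PySem.List.pyGet?_zero_cons]
          simp
        · by_cases hend : i + 1 < (array.length : Int) - 1
          · rw [if_neg (show ¬(¬ i + 1 < (array.length : Int) - 1 ∨ count + 1 = p) from by
                push_neg; exact ⟨hend, hdone⟩)]
            by_cases hbig : 1 ≤ p - (count + 1) ∧
                p - (count + 1) ≤ ((pvOnes array (i + 1)).length : Int)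
            · rw [if_pos hbig,
                  if_pos (show 1 ≤ p - count ∧
                      p - count ≤ ((i :: pvOnes array (i + 1)).length : Int) from
                    ⟨by omega, by simp only [List.length_cons]; push_cast; omega⟩),
                  pyGet?_cons_pos i _ (p - count - 1) (by omega),
                  show p - count - 1 - 1 = p - (count + 1) - 1 from by omega]
            · rw [if_neg hbig,
                  if_neg (show ¬(1 ≤ p - count ∧
                      p - count ≤ ((i :: pvOnes array (i + 1)).length : Int)) from by
                    intro hc3
                    refine hbig ⟨by omega, ?_⟩
                    have := hc3.2
                    simp only [List.length_cons] at this
                    push_cast at this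
                    omega)]
          · -- i+1 = len-1 : the scan is exhausted at i+1
            have hL : pvOnes array (i + 1) = [] := by
              unfold pvOnes
              rw [PySem.List.pyRange_one_eq_nil (by omega)]
              rfl
            rw [if_pos (Or.inl hend), hL,
                if_neg (show ¬(1 ≤ p - count ∧
                    p - count ≤ (([i] : List Int).length : Int)) from by
                  simp only [List.length_cons, List.length_nil]
                  push_cast
                  omega)]
            omega
      · -- array[i] != 1 : count unchanged, same ones list
        have hstep : pvLoopA array p i count = pvLoopA array p (i + 1) count := by
          rw [pvLoopA, dif_pos ⟨h1, h2⟩, hv]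
          simp [hv1]
        have hones : pvOnes array i = pvOnes array (i + 1) := by
          unfold pvOnes
          rw [PySem.List.pyRange_one_cons h1, List.filter_cons]
          simp [hv, hv1]
        rw [hstep, ih (i + 1) count (by omega) (by omega), hones,
            if_neg (show ¬(¬ i < (array.length : Int) - 1 ∨ count = p) from by
              push_neg; exact ⟨h1, h2⟩)]
        by_cases hend : i + 1 < (array.length : Int) - 1
        · rw [if_neg (show ¬(¬ i + 1 < (array.length : Int) - 1 ∨ count = p) from by
              push_neg; exact ⟨hend, h2⟩)]
        · have hL : pvOnes array (i + 1) = [] := by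
            unfold pvOnes
            rw [PySem.List.pyRange_one_eq_nil (by omega)]
            rfl
          rw [if_pos (Or.inl hend), hL,
              if_neg (show ¬(1 ≤ p - count ∧
                  p - count ≤ (([] : List Int).length : Int)) from by
                simp only [List.length_nil]
                push_cast
                omega)]
          omega
    · unfold pvLoopA
      rw [dif_neg hc]
      push_neg at hc
      by_cases h : i < (array.length : Int) - 1
      · rw [if_pos (Or.inr (hc h))]
      · rw [if_pos (Or.inl h)]

-- ===== VERDICT (by name: the statement is the Claim_ definition above) =====
theorem count_ones_per_partition_spec : Claim_equal_count_ones_per_partition := by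
  intro array p start _ hpre
  unfold Spec_count_ones_per_partition count_ones_per_partition count_ones_per_partition_alt
  by_cases h0 : p = 0 ∨ (array.length : Int) - 1 ≤ start
  · rw [if_pos h0]
    unfold pvLoopA
    rw [dif_neg (by rintro ⟨h1, h2⟩; rcases h0 with h | h <;> omega)]
  · rw [if_neg h0]
    push_neg at h0
    have hi : -(array.length : Int) ≤ start := by
      rcases hpre with h | h | h
      · exact absurd h h0.1
      · exact h
      · exact absurd h (by omega)
    rw [pvLoopA_eq array p _ start 0 rfl hi]
    rw [if_neg (by push_neg; exact ⟨h0.2, fun h => h0.1 h.symm⟩)]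
    simp only [sub_zero]
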